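-- pv_equiv track=rewrite | github.com/Cnd-North/adsb-flight-tracker | normalize_manufacturers.py | normalize_manufacturer
-- ===== SOURCE A (Python) =====
-- MANUFACTURER_NORMALIZATION = {
--     # Boeing variants
--     'Boeing': 'Boeing',
--     'The Boeing Company': 'Boeing',
--     'Boeing Company': 'Boeing',
--     'The Boeing Company Commercial Airplane Division': 'Boeing',
--     'BOEING': 'Boeing',
--
--     # Airbus variants
--     'Airbus': 'Airbus',
--     'AIRBUS': 'Airbus',
--     'Airbus Industrie': 'Airbus',
--     'AIRBUS SAS': 'Airbus',
--     'Airbus Canada Lp': 'Airbus',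
--     'Airbus Canada LP': 'Airbus',
--
--     # Bombardier variants
--     'Bombardier': 'Bombardier',
--     'Bombardier Inc': 'Bombardier',
--     'Bombardier Inc.': 'Bombardier',
--     'Bombardier Aerospace': 'Bombardier',
--
--     # Embraer variants
--     'Embraer': 'Embraer',
--     'Embraer S A': 'Embraer',
--     'Embraer S.A.': 'Embraer',
--     'EMBRAER': 'Embraer',
--
--     # Cessna variants
--     'Cessna': 'Cessna',
--     'Cessna Aircraft Company': 'Cessna',
--     'Cessna Aircraft Co': 'Cessna',
--     'CESSNA': 'Cessna',
--
--     # Beechcraft variants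
--     'Beechcraft': 'Beechcraft',
--     'Beech Aircraft Corporation': 'Beechcraft',
--     'Raytheon Aircraft Company': 'Beechcraft',
--
--     # Gulfstream variants
--     'Gulfstream': 'Gulfstream',
--     'Gulfstream Aerospace': 'Gulfstream',
--
--     # De Havilland variants
--     'De Havilland Canada': 'De Havilland Canada',
--     'Dehavilland': 'De Havilland Canada',
--     'DHC': 'De Havilland Canada',
--
--     # ATR variants
--     'ATR': 'ATR',
--     'Avions de Transport Regional': 'ATR',
--
--     # McDonnell Douglas variants
--     'McDonnell Douglas': 'McDonnell Douglas',
--     'Douglas Aircraft Company': 'McDonnell Douglas',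
--
--     # Embraer additional variants
--     'Embraer-empresa Brasileira De': 'Embraer',
--     'Embraer-Empresa Brasileira de Aeronautica S.A.': 'Embraer',
--
--     # British Aerospace/BAE
--     'British Aerospace': 'BAE Systems',
--     'British Aerospace P.l.c.': 'BAE Systems',
--     'BAE Systems': 'BAE Systems',
--
--     # Bell Helicopter
--     'Bell Helicopter': 'Bell Helicopter',
--     'Bell Helicopter Textron': 'Bell Helicopter',
--     'Bell Helicopter Textron Canada Ltd.': 'Bell Helicopter',
--     'Bell Aircraft Corporation': 'Bell Helicopter',
-- }
--
-- def normalize_manufacturer(manufacturer):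
--     """Normalize manufacturer name to canonical form"""
--     if not manufacturer:
--         return manufacturer
--
--     # Try exact match first
--     if manufacturer in MANUFACTURER_NORMALIZATION:
--         return MANUFACTURER_NORMALIZATION[manufacturer]
--
--     # Try case-insensitive match
--     for variant, canonical in MANUFACTURER_NORMALIZATION.items():
--         if manufacturer.lower() == variant.lower():
--             return canonical
--
--     # Return as-is if no mapping found
--     return manufacturer
-- ===== SOURCE B (Python) =====
-- # The normalization data, organized by canonical name: each canonical maps to the
-- # lowercased spellings it covers (so each canonical is written once and case
-- # variants of the same spelling collapse to one entry).
-- CANONICAL_VARIANTS = {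
--     'Boeing': ['boeing', 'the boeing company', 'boeing company',
--                'the boeing company commercial airplane division'],
--     'Airbus': ['airbus', 'airbus industrie', 'airbus sas', 'airbus canada lp'],
--     'Bombardier': ['bombardier', 'bombardier inc', 'bombardier inc.',
--                    'bombardier aerospace'],
--     'Embraer': ['embraer', 'embraer s a', 'embraer s.a.',
--                 'embraer-empresa brasileira de',
--                 'embraer-empresa brasileira de aeronautica s.a.'],
--     'Cessna': ['cessna', 'cessna aircraft company', 'cessna aircraft co'],
--     'Beechcraft': ['beechcraft', 'beech aircraft corporation',
--                    'raytheon aircraft company'],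
--     'Gulfstream': ['gulfstream', 'gulfstream aerospace'],
--     'De Havilland Canada': ['de havilland canada', 'dehavilland', 'dhc'],
--     'ATR': ['atr', 'avions de transport regional'],
--     'McDonnell Douglas': ['mcdonnell douglas', 'douglas aircraft company'],
--     'BAE Systems': ['british aerospace', 'british aerospace p.l.c.',
--                     'bae systems'],
--     'Bell Helicopter': ['bell helicopter', 'bell helicopter textron',
--                         'bell helicopter textron canada ltd.',
--                         'bell aircraft corporation'],
-- }
--
-- # Flattened once at module load: lowercased spelling -> canonical name.
-- _CANON = {variant: canonical
--           for canonical, variants in CANONICAL_VARIANTS.items()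
--           for variant in variants}
--
-- def normalize_manufacturer(manufacturer):
--     """Normalize manufacturer name to canonical form"""
--     if not manufacturer:
--         return manufacturer
--     return _CANON.get(manufacturer.lower(), manufacturer)
-- ===== Notes on version B (the rewrite author's own statement) =====
-- stated objective: idiomatic
-- what changed: Reorganizes the data as canonical -> list of lowercased spellings, flattens it once at module load into a lowercased-key dict, and replaces A's exact-match test plus per-call case-insensitive linear scan (which lowercases every variant on each call) with a single .get() lookup.
import Mathlib
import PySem

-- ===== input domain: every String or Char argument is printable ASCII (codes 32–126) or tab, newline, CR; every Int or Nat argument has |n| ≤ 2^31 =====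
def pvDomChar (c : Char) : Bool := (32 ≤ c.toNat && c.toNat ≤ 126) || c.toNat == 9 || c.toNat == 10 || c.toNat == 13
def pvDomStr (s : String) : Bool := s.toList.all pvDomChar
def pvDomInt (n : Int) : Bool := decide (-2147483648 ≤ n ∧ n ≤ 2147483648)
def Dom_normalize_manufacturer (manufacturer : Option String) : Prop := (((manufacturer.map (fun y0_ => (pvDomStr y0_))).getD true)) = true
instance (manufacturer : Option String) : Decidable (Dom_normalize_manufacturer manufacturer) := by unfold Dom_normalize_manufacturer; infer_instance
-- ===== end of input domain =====

-- B reorganizes the table as canonical -> lowercased spellings, flattens it once into a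
-- lowercased-key dict, and replaces A's exact-match test plus per-call case-insensitive
-- linear scan with a single lookup (idiomatic).


-- ===== PORT A =====
-- the MANUFACTURER_NORMALIZATION dict literal (module-level, shared source table of both files)
def pvTable : List (String × String) :=
  [("Boeing", "Boeing"),
   ("The Boeing Company", "Boeing"),
   ("Boeing Company", "Boeing"),
   ("The Boeing Company Commercial Airplane Division", "Boeing"),
   ("BOEING", "Boeing"),
   ("Airbus", "Airbus"),
   ("AIRBUS", "Airbus"),
   ("Airbus Industrie", "Airbus"),
   ("AIRBUS SAS", "Airbus"),
   ("Airbus Canada Lp", "Airbus"),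
   ("Airbus Canada LP", "Airbus"),
   ("Bombardier", "Bombardier"),
   ("Bombardier Inc", "Bombardier"),
   ("Bombardier Inc.", "Bombardier"),
   ("Bombardier Aerospace", "Bombardier"),
   ("Embraer", "Embraer"),
   ("Embraer S A", "Embraer"),
   ("Embraer S.A.", "Embraer"),
   ("EMBRAER", "Embraer"),
   ("Cessna", "Cessna"),
   ("Cessna Aircraft Company", "Cessna"),
   ("Cessna Aircraft Co", "Cessna"),
   ("CESSNA", "Cessna"),
   ("Beechcraft", "Beechcraft"),
   ("Beech Aircraft Corporation", "Beechcraft"),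
   ("Raytheon Aircraft Company", "Beechcraft"),
   ("Gulfstream", "Gulfstream"),
   ("Gulfstream Aerospace", "Gulfstream"),
   ("De Havilland Canada", "De Havilland Canada"),
   ("Dehavilland", "De Havilland Canada"),
   ("DHC", "De Havilland Canada"),
   ("ATR", "ATR"),
   ("Avions de Transport Regional", "ATR"),
   ("McDonnell Douglas", "McDonnell Douglas"),
   ("Douglas Aircraft Company", "McDonnell Douglas"),
   ("Embraer-empresa Brasileira De", "Embraer"),
   ("Embraer-Empresa Brasileira de Aeronautica S.A.", "Embraer"),
   ("British Aerospace", "BAE Systems"),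
   ("British Aerospace P.l.c.", "BAE Systems"),
   ("BAE Systems", "BAE Systems"),
   ("Bell Helicopter", "Bell Helicopter"),
   ("Bell Helicopter Textron", "Bell Helicopter"),
   ("Bell Helicopter Textron Canada Ltd.", "Bell Helicopter"),
   ("Bell Aircraft Corporation", "Bell Helicopter")]

def pvDictA : PySem.Dict String String := PySem.Dict.mk pvTable

-- A's `for variant, canonical in MANUFACTURER_NORMALIZATION.items(): if manufacturer.lower() == variant.lower(): return canonical`
-- (t is manufacturer.lower(); Python recomputes the identical value each iteration)
def pvLoopA (t : String) : List (String × String) → Option String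
  | [] => none
  | (k, v) :: rest => if t = PySem.Str.lower k then some v else pvLoopA t rest

def normalize_manufacturer (manufacturer : Option String) : Option String :=
  match manufacturer with
  | none => none                                          -- `if not manufacturer: return manufacturer`
  | some s =>
    if s = "" then some s                                 -- "" is falsy
    else
      match pvDictA.get? s with                           -- exact-match branch
      | some v => some v
      | none =>
        match pvLoopA (PySem.Str.lower s) pvDictA.items with  -- case-insensitive scan
        | some v => some v
        | none => some s                                  -- return as-is

-- ===== PORT B =====
-- CANONICAL_VARIANTS: canonical name -> lowercased spellings it covers
def pvGroups : List (String × List String) :=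
  [("Boeing", ["boeing", "the boeing company", "boeing company",
               "the boeing company commercial airplane division"]),
   ("Airbus", ["airbus", "airbus industrie", "airbus sas", "airbus canada lp"]),
   ("Bombardier", ["bombardier", "bombardier inc", "bombardier inc.",
                   "bombardier aerospace"]),
   ("Embraer", ["embraer", "embraer s a", "embraer s.a.",
                "embraer-empresa brasileira de",
                "embraer-empresa brasileira de aeronautica s.a."]),
   ("Cessna", ["cessna", "cessna aircraft company", "cessna aircraft co"]),
   ("Beechcraft", ["beechcraft", "beech aircraft corporation",
                   "raytheon aircraft company"]),
   ("Gulfstream", ["gulfstream", "gulfstream aerospace"]),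
   ("De Havilland Canada", ["de havilland canada", "dehavilland", "dhc"]),
   ("ATR", ["atr", "avions de transport regional"]),
   ("McDonnell Douglas", ["mcdonnell douglas", "douglas aircraft company"]),
   ("BAE Systems", ["british aerospace", "british aerospace p.l.c.",
                    "bae systems"]),
   ("Bell Helicopter", ["bell helicopter", "bell helicopter textron",
                        "bell helicopter textron canada ltd.",
                        "bell aircraft corporation"])]

-- _CANON = {variant: canonical for canonical, variants in CANONICAL_VARIANTS.items() for variant in variants}
def pvCanon : PySem.Dict String String :=
  PySem.Dict.ofList (pvGroups.flatMap (fun g => g.2.map (fun variant => (variant, g.1))))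

def normalize_manufacturer_alt (manufacturer : Option String) : Option String :=
  match manufacturer with
  | none => none                                          -- `if not manufacturer: return manufacturer`
  | some s =>
    if s = "" then some s                                 -- "" is falsy
    else some (pvCanon.getD (PySem.Str.lower s) s)        -- _CANON.get(manufacturer.lower(), manufacturer)

-- ===== PRECONDITION & SPEC =====
def Spec_normalize_manufacturer (manufacturer : Option String) (out : Option String) : Prop := out = normalize_manufacturer_alt manufacturer
instance (manufacturer : Option String) (out : Option String) : Decidable (Spec_normalize_manufacturer manufacturer out) := by unfold Spec_normalize_manufacturer; infer_instance

-- ===== CLAIM (what is proved, stated in full; the proofs are below) =====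
def Claim_equal_normalize_manufacturer : Prop := ∀ (manufacturer : Option String), Dom_normalize_manufacturer manufacturer → Spec_normalize_manufacturer manufacturer (normalize_manufacturer manufacturer)

-- ===== LEMMAS AND PROOFS =====

-- the lowered variant keys, with duplicates, in table order
def pvLKeys : List String := pvTable.map (fun p => PySem.Str.lower p.1)

-- A's scan returns none when no variant lowers to t
theorem pvLoopA_none (t : String) (l : List (String × String))
    (h : ∀ p ∈ l, t ≠ PySem.Str.lower p.1) : pvLoopA t l = none := by
  induction l with
  | nil => rfl
  | cons p rest ih =>
    obtain ⟨k, v⟩ := p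
    simp only [pvLoopA]
    rw [if_neg (h (k, v) (List.mem_cons_self))]
    exact ih (fun q hq => h q (List.mem_cons_of_mem _ hq))

-- on every lowered key, A's scan and B's flattened dict agree (and hit): finite check
set_option maxRecDepth 40000 in
theorem pvHit : ∀ t ∈ pvLKeys, pvLoopA t pvTable ≠ none ∧ pvLoopA t pvTable = pvCanon.get? t := by decide

-- B's flattened dict has no keys beyond the lowered variants: finite check
set_option maxRecDepth 40000 in
theorem pvKeysSub : ∀ t ∈ pvCanon.keys, t ∈ pvLKeys := by decide

-- the two ports agree on every exact table key: finite check
set_option maxRecDepth 40000 in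
theorem pvExact : ∀ s ∈ pvTable.map Prod.fst,
    normalize_manufacturer (some s) = normalize_manufacturer_alt (some s) := by decide

-- ===== VERDICT (by name: the statement is the Claim_ definition above) =====
theorem normalize_manufacturer_spec : Claim_equal_normalize_manufacturer := by
  intro m _
  unfold Spec_normalize_manufacturer
  match m with
  | none => rfl
  | some s =>
    by_cases hk : s ∈ pvTable.map Prod.fst
    · exact pvExact s hk
    · by_cases hs : s = ""
      · simp [normalize_manufacturer, normalize_manufacturer_alt, hs]
      · have hget : pvDictA.get? s = none := by
          rw [PySem.Dict.get?_eq_none_iff_not_mem_keys]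
          simpa [pvDictA, PySem.Dict.keys] using hk
        by_cases hl : PySem.Str.lower s ∈ pvLKeys
        · obtain ⟨hne, heq⟩ := pvHit _ hl
          obtain ⟨v, hv⟩ := Option.ne_none_iff_exists'.mp hne
          simp only [normalize_manufacturer, normalize_manufacturer_alt, if_neg hs, hget]
          have hidx : pvCanon.get? (PySem.Str.lower s) = some v := heq ▸ hv
          rw [show pvDictA.items = pvTable from rfl, hv, PySem.Dict.getD_eq_get?_getD, hidx]
          rfl
        · have hloop : pvLoopA (PySem.Str.lower s) pvTable = none := by
            apply pvLoopA_none
            intro p hp hc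
            exact hl (hc ▸ List.mem_map_of_mem hp)
          have hidx : pvCanon.get? (PySem.Str.lower s) = none := by
            rw [PySem.Dict.get?_eq_none_iff_not_mem_keys]
            exact fun h => hl (pvKeysSub _ h)
          simp only [normalize_manufacturer, normalize_manufacturer_alt, if_neg hs, hget,
            show pvDictA.items = pvTable from rfl, hloop, PySem.Dict.getD_eq_get?_getD, hidx, Option.getD]
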